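-- pv_equiv track=rewrite | github.com/Cornelius-Chen/A-Share-Quant_TrY | src/a_share_quant/info_center/taxonomy/materialize_a_share_business_purity_foundation_v1.py | _latest_group
-- ===== SOURCE A (Python) =====
-- def _latest_group(rows: list[dict[str, str]], key: str) -> dict[str, list[dict[str, str]]]:
--     by_symbol: dict[str, list[dict[str, str]]] = {}
--     latest_date: dict[str, str] = {}
--     for row in rows:
--         symbol = row["symbol"]
--         trade_date = row["trade_date"]
--         if symbol not in latest_date or trade_date > latest_date[symbol]:
--             latest_date[symbol] = trade_date
--     for row in rows:
--         symbol = row["symbol"]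
--         if row["trade_date"] == latest_date[symbol]:
--             by_symbol.setdefault(symbol, []).append(row)
--     return by_symbol
-- ===== SOURCE B (Python) =====
-- def _latest_group(rows: list[dict[str, str]], key: str) -> dict[str, list[dict[str, str]]]:
--     by_symbol: dict[str, list[dict[str, str]]] = {}
--     latest_date: dict[str, str] = {}
--     for row in rows:
--         symbol = row["symbol"]
--         trade_date = row["trade_date"]
--         if symbol not in latest_date or trade_date > latest_date[symbol]:
--             latest_date[symbol] = trade_date
--             by_symbol.pop(symbol, None)   # move-to-end: key order = first row of the final latest date
--             by_symbol[symbol] = [row]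
--         elif trade_date == latest_date[symbol]:
--             by_symbol[symbol].append(row)
--     return by_symbol
-- ===== Notes on version B (the rewrite author's own statement) =====
-- stated objective: alternative
-- what changed: A's two passes over rows (first compute every symbol's latest date, then re-scan to collect matching rows) are fused into one pass that keeps the running latest date and group per symbol, resetting the group (and moving the key to the end) when a strictly newer date appears and appending on an equal date.
import Mathlib
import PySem

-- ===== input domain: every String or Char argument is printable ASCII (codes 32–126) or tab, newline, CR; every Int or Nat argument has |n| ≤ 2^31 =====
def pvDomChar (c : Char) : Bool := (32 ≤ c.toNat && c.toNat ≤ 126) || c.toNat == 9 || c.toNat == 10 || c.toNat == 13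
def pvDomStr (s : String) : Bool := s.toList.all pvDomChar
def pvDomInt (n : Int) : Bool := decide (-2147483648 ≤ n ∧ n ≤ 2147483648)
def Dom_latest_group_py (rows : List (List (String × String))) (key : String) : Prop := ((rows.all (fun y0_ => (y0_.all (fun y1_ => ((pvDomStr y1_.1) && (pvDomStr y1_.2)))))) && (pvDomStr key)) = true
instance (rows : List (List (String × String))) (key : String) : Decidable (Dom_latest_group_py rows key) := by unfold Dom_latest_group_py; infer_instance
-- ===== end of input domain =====

-- B fuses A's two passes into one loop that keeps the running latest-date groups
-- (reset the group and move the key to the end on a strictly newer date, append on an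
-- equal date); same return value, objective: alternative single-pass decomposition.
-- Both versions only READ their arguments (the returned lists share the row dicts).

-- shared type-convention boundary: a Python row dict from its association list
def pvRowDict (row : List (String × String)) : PySem.Dict String String :=
  PySem.Dict.ofList row

-- ===== PORT A =====
-- first pass: latest_date[symbol] = max trade_date seen for symbol
def stepA1 (latest_date : PySem.Dict String String) (row : List (String × String)) :
    PySem.Dict String String :=
  let symbol := (pvRowDict row).getD "symbol" ""
  let trade_date := (pvRowDict row).getD "trade_date" ""
  if latest_date.contains symbol = false ∨ latest_date.getD symbol "" < trade_date then
    latest_date.insert symbol trade_date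
  else latest_date

-- second pass: by_symbol.setdefault(symbol, []).append(row) when the date is the latest
def stepA2 (latest_date : PySem.Dict String String)
    (by_symbol : PySem.Dict String (List (List (String × String))))
    (row : List (String × String)) : PySem.Dict String (List (List (String × String))) :=
  let symbol := (pvRowDict row).getD "symbol" ""
  if (pvRowDict row).getD "trade_date" "" = latest_date.getD symbol "" then
    by_symbol.modify symbol [] (· ++ [(pvRowDict row).items])
  else by_symbol

def latest_group_py (rows : List (List (String × String))) (key : String) :
    List (String × List (List (String × String))) :=
  let latest_date := rows.foldl stepA1 PySem.Dict.empty
  let by_symbol := rows.foldl (stepA2 latest_date) PySem.Dict.empty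
  by_symbol.items

-- ===== PORT B =====
-- single pass over rows, state = (latest_date, by_symbol)
def stepB (st : PySem.Dict String String × PySem.Dict String (List (List (String × String))))
    (row : List (String × String)) :
    PySem.Dict String String × PySem.Dict String (List (List (String × String))) :=
  let symbol := (pvRowDict row).getD "symbol" ""
  let trade_date := (pvRowDict row).getD "trade_date" ""
  if st.1.contains symbol = false ∨ st.1.getD symbol "" < trade_date then
    -- strictly newer date: reset the group; pop+assign moves the key to the end
    (st.1.insert symbol trade_date, (st.2.erase symbol).insert symbol [(pvRowDict row).items])
  else if trade_date = st.1.getD symbol "" then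
    (st.1, st.2.modify symbol [] (· ++ [(pvRowDict row).items]))
  else st

def latest_group_py_alt (rows : List (List (String × String))) (key : String) :
    List (String × List (List (String × String))) :=
  (rows.foldl stepB (PySem.Dict.empty, PySem.Dict.empty)).2.items

-- ===== PRECONDITION & SPEC =====
-- Pre_ excludes exactly the rows on which Python raises KeyError: a row missing the
-- "symbol" or "trade_date" key (both implementations raise there).
def Pre_latest_group_py (rows : List (List (String × String))) (key : String) : Prop :=
  ∀ row ∈ rows, "symbol" ∈ row.map Prod.fst ∧ "trade_date" ∈ row.map Prod.fst
instance (rows : List (List (String × String))) (key : String) :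
    Decidable (Pre_latest_group_py rows key) := by unfold Pre_latest_group_py; infer_instance

def pvWitness_latest_group_py : (List (List (String × String))) × String :=
  ([[("symbol", "AAA"), ("trade_date", "2024-01-02")],
    [("symbol", "AAA"), ("trade_date", "2024-01-01")]], "x")

def Spec_latest_group_py (rows : List (List (String × String))) (key : String)
    (out : List (String × List (List (String × String)))) : Prop :=
  out = latest_group_py_alt rows key
instance (rows : List (List (String × String))) (key : String)
    (out : List (String × List (List (String × String)))) :
    Decidable (Spec_latest_group_py rows key out) := by unfold Spec_latest_group_py; infer_instance

-- ===== CLAIM (what is proved, stated in full; the proofs are below) =====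
def Claim_equal_latest_group_py : Prop := ∀ (rows : List (List (String × String))) (key : String), Dom_latest_group_py rows key → Pre_latest_group_py rows key → Spec_latest_group_py rows key (latest_group_py rows key)

-- ===== LEMMAS AND PROOFS =====

-- definitional unfoldings of the loop bodies (rw-safe: they do not touch the foldl argument)
theorem stepA1_def (ld : PySem.Dict String String) (r : List (String × String)) :
    stepA1 ld r =
      if ld.contains ((pvRowDict r).getD "symbol" "") = false ∨
          ld.getD ((pvRowDict r).getD "symbol" "") "" < (pvRowDict r).getD "trade_date" "" then
        ld.insert ((pvRowDict r).getD "symbol" "") ((pvRowDict r).getD "trade_date" "")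
      else ld := rfl

theorem stepA2_def (ld bs : _) (r : List (String × String)) :
    stepA2 ld bs r =
      if (pvRowDict r).getD "trade_date" "" = ld.getD ((pvRowDict r).getD "symbol" "") "" then
        bs.modify ((pvRowDict r).getD "symbol" "") [] (· ++ [(pvRowDict r).items])
      else bs := rfl

theorem stepB_def (st : _) (r : List (String × String)) :
    stepB st r =
      if st.1.contains ((pvRowDict r).getD "symbol" "") = false ∨
          st.1.getD ((pvRowDict r).getD "symbol" "") "" < (pvRowDict r).getD "trade_date" "" then
        (st.1.insert ((pvRowDict r).getD "symbol" "") ((pvRowDict r).getD "trade_date" ""),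
         (st.2.erase ((pvRowDict r).getD "symbol" "")).insert ((pvRowDict r).getD "symbol" "")
           [(pvRowDict r).items])
      else if (pvRowDict r).getD "trade_date" "" = st.1.getD ((pvRowDict r).getD "symbol" "") "" then
        (st.1, st.2.modify ((pvRowDict r).getD "symbol" "") [] (· ++ [(pvRowDict r).items]))
      else st := rfl

-- Dict facts about erase (erase is not covered by the PySem lemma book)
theorem pv_find?_filter_ne {ν : Type} (s t : String) (hne : t ≠ s) (l : List (String × ν)) :
    (l.filter (fun p => !(p.1 == s))).find? (fun p => p.1 == t) = l.find? (fun p => p.1 == t) := by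
  induction l with
  | nil => rfl
  | cons p l ih =>
    have hne' : ¬ s = t := fun h => hne h.symm
    by_cases hp : p.1 = s
    · simp [List.find?_cons, hp, hne'] <;> simpa using ih
    · by_cases hpt : p.1 = t <;> simp [List.find?_cons, hp, hpt, hne', hne] <;> simpa using ih

theorem pv_get?_erase_of_ne {ν : Type} (d : PySem.Dict String ν) (s t : String) (hne : t ≠ s) :
    (d.erase s).get? t = d.get? t := by
  simp only [PySem.Dict.get?, PySem.Dict.erase]
  rw [pv_find?_filter_ne s t hne]

theorem pv_getD_erase_of_ne {ν : Type} (d : PySem.Dict String ν) (s t : String) (hne : t ≠ s)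
    (d0 : ν) : (d.erase s).getD t d0 = d.getD t d0 := by
  simp only [PySem.Dict.getD, pv_get?_erase_of_ne d s t hne]

theorem pv_contains_erase_of_ne {ν : Type} (d : PySem.Dict String ν) (s t : String)
    (hne : t ≠ s) : (d.erase s).contains t = d.contains t := by
  rw [PySem.Dict.contains_eq_isSome_get?, PySem.Dict.contains_eq_isSome_get?,
    pv_get?_erase_of_ne d s t hne]

theorem pv_get?_erase_self {ν : Type} (d : PySem.Dict String ν) (s : String) :
    (d.erase s).get? s = none := by
  simp only [PySem.Dict.get?, PySem.Dict.erase, Option.map_eq_none_iff, List.find?_eq_none,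
    List.mem_filter]
  intro p hp
  simpa using hp.2

theorem pv_getD_erase_self {ν : Type} (d : PySem.Dict String ν) (s : String) (d0 : ν) :
    (d.erase s).getD s d0 = d0 := by
  simp [PySem.Dict.getD, pv_get?_erase_self]

theorem pv_erase_empty {ν : Type} (s : String) :
    (PySem.Dict.empty : PySem.Dict String ν).erase s = PySem.Dict.empty := rfl

theorem pv_filter_map_insert_self {ν : Type} (s : String) (v : ν) (l : List (String × ν)) :
    (l.map (fun p => if (p.1 == s) = true then (s, v) else p)).filter (fun p => !(p.1 == s)) =
      l.filter (fun p => !(p.1 == s)) := by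
  induction l with
  | nil => rfl
  | cons p l ih => by_cases h : p.1 = s <;> simp [h] <;> simpa using ih

theorem pv_filter_map_insert_ne {ν : Type} (s t : String) (hne : t ≠ s) (v : ν)
    (l : List (String × ν)) :
    (l.map (fun p => if (p.1 == t) = true then (t, v) else p)).filter (fun p => !(p.1 == s)) =
      (l.filter (fun p => !(p.1 == s))).map (fun p => if (p.1 == t) = true then (t, v) else p) := by
  induction l with
  | nil => rfl
  | cons p l ih =>
    have hne' : ¬ s = t := fun h => hne h.symm
    by_cases h : p.1 = t
    · have h2 : ¬ p.1 = s := fun hs => hne ((hs.symm.trans h) ▸ rfl)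
      simp [h, h2, hne, hne'] <;> simpa using ih
    · by_cases h2 : p.1 = s <;> simp [h, h2, hne, hne'] <;> simpa using ih

theorem pv_erase_insert_self {ν : Type} (d : PySem.Dict String ν) (s : String) (v : ν) :
    (d.insert s v).erase s = d.erase s := by
  apply PySem.Dict.ext
  simp only [PySem.Dict.insert, PySem.Dict.erase]
  split
  · exact pv_filter_map_insert_self s v d.items
  · simp [List.filter_append]

theorem pv_erase_insert_of_ne {ν : Type} (d : PySem.Dict String ν) (s t : String)
    (hne : t ≠ s) (v : ν) : (d.insert t v).erase s = (d.erase s).insert t v := by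
  have hcont := pv_contains_erase_of_ne d s t hne
  apply PySem.Dict.ext
  simp only [PySem.Dict.erase] at hcont
  simp only [PySem.Dict.insert, PySem.Dict.erase, hcont]
  split
  · exact pv_filter_map_insert_ne s t hne v d.items
  · rw [List.filter_append]
    simp [hne]

theorem pv_erase_modify_self {ν : Type} (d : PySem.Dict String ν) (s : String)
    (d0 : ν) (f : ν → ν) : (d.modify s d0 f).erase s = d.erase s := by
  show (d.insert s (f (d.getD s d0))).erase s = d.erase s
  exact pv_erase_insert_self d s _

theorem pv_erase_modify_of_ne {ν : Type} (d : PySem.Dict String ν) (s t : String)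
    (hne : t ≠ s) (d0 : ν) (f : ν → ν) :
    (d.modify t d0 f).erase s = (d.erase s).modify t d0 f := by
  show (d.insert t (f (d.getD t d0))).erase s = (d.erase s).insert t (f ((d.erase s).getD t d0))
  rw [pv_getD_erase_of_ne d s t hne]
  exact pv_erase_insert_of_ne d s t hne _

-- pass-1 invariant step: stepA1 never drops a key and never lowers a stored date
theorem pv_stepA1_mono (ld : PySem.Dict String String) (r : List (String × String))
    (t dd : String) (h1 : ld.contains t = true) (h2 : ¬ ld.getD t "" < dd) :
    (stepA1 ld r).contains t = true ∧ ¬ (stepA1 ld r).getD t "" < dd := by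
  rw [stepA1_def]
  split
  · rename_i hc
    refine ⟨by simp [PySem.Dict.contains_insert, h1], ?_⟩
    by_cases hts : t = (pvRowDict r).getD "symbol" ""
    · subst hts
      rw [PySem.Dict.getD_insert_self]
      rcases hc with hc | hc
      · rw [h1] at hc; cases hc
      · intro hlt; exact h2 (lt_trans hc hlt)
    · rw [PySem.Dict.getD_insert_of_ne _ _ _ hts]; exact h2
  · exact ⟨h1, h2⟩

-- pass-1 invariant: every row's symbol is present with a date at least the row's date
theorem pv_passL_inv (rows : List (List (String × String))) :
    ∀ row ∈ rows,
      (rows.foldl stepA1 PySem.Dict.empty).contains ((pvRowDict row).getD "symbol" "") = true ∧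
      ¬ (rows.foldl stepA1 PySem.Dict.empty).getD ((pvRowDict row).getD "symbol" "") "" <
          (pvRowDict row).getD "trade_date" "" := by
  induction rows using List.reverseRecOn with
  | nil => intro row h; cases h
  | append_singleton rows r ih =>
    intro row hrow
    rw [List.foldl_append, List.foldl_cons, List.foldl_nil]
    rcases List.mem_append.mp hrow with h | h
    · exact pv_stepA1_mono _ _ _ _ (ih row h).1 (ih row h).2
    · simp only [List.mem_singleton] at h; subst h
      rw [stepA1_def]
      split
      · exact ⟨by simp [PySem.Dict.contains_insert],
          by rw [PySem.Dict.getD_insert_self]; exact lt_irrefl _⟩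
      · rename_i hc
        rw [not_or] at hc
        exact ⟨by simpa using hc.1, hc.2⟩

-- if s's stored date cannot be matched, pass 2 under the updated table is pass 2 with s erased
theorem pv_foldl_stepA2_erase (rows : List (List (String × String)))
    (ld ld2 : PySem.Dict String String) (s : String)
    (acc : PySem.Dict String (List (List (String × String))))
    (hagree : ∀ t, t ≠ s → ld2.getD t "" = ld.getD t "")
    (hmax : ∀ row ∈ rows, (pvRowDict row).getD "symbol" "" = s →
        (pvRowDict row).getD "trade_date" "" ≠ ld2.getD s "") :
    rows.foldl (stepA2 ld2) (acc.erase s) = (rows.foldl (stepA2 ld) acc).erase s := by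
  induction rows generalizing acc with
  | nil => simp
  | cons r rest ih =>
    rw [List.foldl_cons, List.foldl_cons]
    have hstep : stepA2 ld2 (acc.erase s) r = (stepA2 ld acc r).erase s := by
      rw [stepA2_def, stepA2_def]
      by_cases hts : (pvRowDict r).getD "symbol" "" = s
      · rw [if_neg (by rw [hts]; exact hmax r (List.mem_cons_self) hts)]
        split
        · rw [hts, pv_erase_modify_self]
        · rfl
      · rw [hagree _ hts]
        split
        · rw [pv_erase_modify_of_ne _ _ _ hts]
        · rfl
    rw [hstep]
    exact ih _ (fun row h => hmax row (List.mem_cons_of_mem _ h))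

-- the single pass computes pass 1 together with pass 2 under the final table
theorem pv_main (rows : List (List (String × String))) :
    rows.foldl stepB (PySem.Dict.empty, PySem.Dict.empty) =
      (rows.foldl stepA1 PySem.Dict.empty,
       rows.foldl (stepA2 (rows.foldl stepA1 PySem.Dict.empty)) PySem.Dict.empty) := by
  induction rows using List.reverseRecOn with
  | nil => rfl
  | append_singleton rows r ih =>
    have h1 : (rows ++ [r]).foldl stepB (PySem.Dict.empty, PySem.Dict.empty) =
        stepB (rows.foldl stepA1 PySem.Dict.empty,
          rows.foldl (stepA2 (rows.foldl stepA1 PySem.Dict.empty)) PySem.Dict.empty) r := by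
      rw [List.foldl_append, ih, List.foldl_cons, List.foldl_nil]
    set ld := rows.foldl stepA1 PySem.Dict.empty with hld
    set bs := rows.foldl (stepA2 ld) PySem.Dict.empty with hbs
    set s := (pvRowDict r).getD "symbol" "" with hs
    set d := (pvRowDict r).getD "trade_date" "" with hd
    have h2 : (rows ++ [r]).foldl stepA1 PySem.Dict.empty = stepA1 ld r := by
      rw [List.foldl_append, List.foldl_cons, List.foldl_nil]
    rw [h1, h2, stepB_def, stepA1_def, ← hs, ← hd]
    by_cases hc : ld.contains s = false ∨ ld.getD s "" < d
    · rw [if_pos hc, if_pos hc]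
      set ld2 := ld.insert s d with hld2
      have herase : rows.foldl (stepA2 ld2) PySem.Dict.empty = bs.erase s := by
        rw [hbs, ← pv_foldl_stepA2_erase rows ld ld2 s PySem.Dict.empty]
        · rw [pv_erase_empty]
        · intro t ht; exact PySem.Dict.getD_insert_of_ne _ _ _ ht
        · intro row hrow hsym
          have hinv := pv_passL_inv rows row hrow
          rw [hsym] at hinv
          rw [hld2, PySem.Dict.getD_insert_self]
          rcases hc with hc' | hc'
          · rw [hinv.1] at hc'; cases hc'
          · intro heq; exact hinv.2 (by rw [heq]; exact hc')
      have h3 : (rows ++ [r]).foldl (stepA2 ld2) PySem.Dict.empty =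
          stepA2 ld2 (bs.erase s) r := by
        rw [List.foldl_append, herase, List.foldl_cons, List.foldl_nil]
      rw [h3, stepA2_def, ← hs, ← hd]
      rw [if_pos (by rw [hld2, PySem.Dict.getD_insert_self])]
      rw [PySem.Dict.modify, pv_getD_erase_self]
      rfl
    · rw [if_neg hc, if_neg hc]
      have h3 : (rows ++ [r]).foldl (stepA2 ld) PySem.Dict.empty = stepA2 ld bs r := by
        rw [List.foldl_append, ← hbs, List.foldl_cons, List.foldl_nil]
      rw [h3, stepA2_def, ← hs, ← hd]
      by_cases heq : d = ld.getD s ""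
      · rw [if_pos heq, if_pos heq]
      · rw [if_neg heq, if_neg heq]

-- ===== VERDICT (by name: the statement is the Claim_ definition above) =====
theorem latest_group_py_spec : Claim_equal_latest_group_py := by
  intro rows key _hdom _hpre
  unfold Spec_latest_group_py latest_group_py latest_group_py_alt
  rw [pv_main rows]
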